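-- pv_equiv track=rewrite | github.com/S4nh1seR/DataViz | digraphviz/digraphviz.py | less
-- ===== SOURCE A (Python) =====
-- from typing import List, Optional
--
-- def less(ordered_lhs: List[int], ordered_rhs: List[int]):
--     if len(ordered_lhs) == 0:
--         return True
--     if len(ordered_rhs) == 0:
--         return False
--     if ordered_lhs[-1] == ordered_rhs[-1]:
--         return less(ordered_lhs[:-1], ordered_rhs[:-1])
--     elif ordered_lhs[-1] < ordered_rhs[-1]:
--         return True
--     else:
--         return False
-- ===== SOURCE B (Python) =====
-- def less(ordered_lhs, ordered_rhs):
--     # A is lexicographic <= of the two lists read right-to-left.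
--     return ordered_lhs[::-1] <= ordered_rhs[::-1]
-- ===== Notes on version B (the rewrite author's own statement) =====
-- stated objective: faster
-- what changed: Replaced A's recursion that slices xs[:-1] off both lists at every step by a single reversal of each list followed by one left-to-right lexicographic <= comparison (Python's built-in list comparison).
import Mathlib
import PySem

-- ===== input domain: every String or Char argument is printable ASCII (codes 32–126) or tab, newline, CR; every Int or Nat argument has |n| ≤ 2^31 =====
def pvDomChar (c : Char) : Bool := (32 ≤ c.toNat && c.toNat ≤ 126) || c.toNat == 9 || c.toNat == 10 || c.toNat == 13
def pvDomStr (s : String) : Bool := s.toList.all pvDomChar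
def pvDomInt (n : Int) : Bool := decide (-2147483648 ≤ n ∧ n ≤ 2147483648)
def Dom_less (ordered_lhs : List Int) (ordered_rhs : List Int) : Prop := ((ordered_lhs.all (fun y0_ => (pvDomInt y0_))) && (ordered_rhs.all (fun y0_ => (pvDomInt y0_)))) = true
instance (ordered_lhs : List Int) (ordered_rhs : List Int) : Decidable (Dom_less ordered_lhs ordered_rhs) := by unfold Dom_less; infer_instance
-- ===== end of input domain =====

-- B replaces A's quadratic copy-and-recurse (each step slices the lists) by reversing
-- both lists once and comparing them lexicographically left-to-right in a single pass (simpler, faster).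

-- ===== PORT A =====
-- literal transliteration of A's recursion on xs[:-1] / xs[-1]
def less (ordered_lhs : List Int) (ordered_rhs : List Int) : Bool :=
  if ordered_lhs.length = 0 then true
  else if ordered_rhs.length = 0 then false
  else
    match PySem.List.pyGet? ordered_lhs (-1), PySem.List.pyGet? ordered_rhs (-1) with
    | some a, some b =>
      if a = b then
        less (PySem.List.slice ordered_lhs none (some (-1))) (PySem.List.slice ordered_rhs none (some (-1)))
      else if a < b then true
      else false
    | _, _ => false  -- unreachable: both lists are nonempty here, so xs[-1] exists
termination_by ordered_lhs.length
decreasing_by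
  simp [PySem.List.slice_to_neg_one]
  omega

-- ===== PORT B =====
-- Python's built-in list `<=` (lexicographic, shorter prefix is smaller), ported by hand
def pyListLe : List Int → List Int → Bool
  | [], _ => true
  | _ :: _, [] => false
  | a :: as, b :: bs => if a < b then true else if b < a then false else pyListLe as bs

def less_alt (ordered_lhs : List Int) (ordered_rhs : List Int) : Bool :=
  pyListLe ordered_lhs.reverse ordered_rhs.reverse

-- ===== PRECONDITION & SPEC =====
def Spec_less (ordered_lhs : List Int) (ordered_rhs : List Int) (out : Bool) : Prop := out = less_alt ordered_lhs ordered_rhs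
instance (ordered_lhs : List Int) (ordered_rhs : List Int) (out : Bool) : Decidable (Spec_less ordered_lhs ordered_rhs out) := by unfold Spec_less; infer_instance

-- ===== CLAIM (what is proved, stated in full; the proofs are below) =====
def Claim_equal_less : Prop := ∀ (ordered_lhs : List Int) (ordered_rhs : List Int), Dom_less ordered_lhs ordered_rhs → Spec_less ordered_lhs ordered_rhs (less ordered_lhs ordered_rhs)

-- ===== LEMMAS AND PROOFS =====

theorem less_eq_pyListLe_reverse (n : Nat) :
    ∀ (l r : List Int), l.length ≤ n → less l r = pyListLe l.reverse r.reverse := by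
  induction n with
  | zero =>
    intro l r hl
    have : l = [] := List.eq_nil_of_length_eq_zero (Nat.le_zero.mp hl)
    subst this
    simp [less, pyListLe]
  | succ n ih =>
    intro l r hl
    rcases List.eq_nil_or_concat l with rfl | ⟨ys, a, rfl⟩
    · simp [less, pyListLe]
    · rcases List.eq_nil_or_concat r with rfl | ⟨zs, b, rfl⟩
      · rw [less]
        simp [pyListLe]
      · rw [less]
        simp only [List.concat_eq_append, List.length_append, List.length_cons,
          List.length_nil, PySem.List.pyGet?_neg_one_append_singleton,
          PySem.List.slice_to_neg_one, List.dropLast_concat, List.reverse_append,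
          List.reverse_cons, List.reverse_nil, List.nil_append, List.cons_append,
          pyListLe]
        have hys : ys.length ≤ n := by
          simp [List.length_append] at hl; omega
        by_cases hab : a = b
        · subst hab
          simp [ih ys zs hys]
        · rcases lt_trichotomy a b with h | h | h
          · simp [hab, h]
          · exact absurd h hab
          · simp [hab, h, not_lt_of_gt h]

-- ===== VERDICT (by name: the statement is the Claim_ definition above) =====
theorem less_spec : Claim_equal_less := by
  intro l r _
  unfold Spec_less less_alt
  exact less_eq_pyListLe_reverse l.length l r le_rfl
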